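-- pv_equiv track=rewrite | github.com/rzamarefat/DAS-related | Udemy - Ace Coding Interview with 100 Algorithms Challenge in Python/97_Unique_Digit_Products.py | find_unique_digit_products
-- ===== SOURCE A (Python) =====
-- def find_unique_digit_products(number):
--     unique_products = set()
--
--     for i in range(1, number+1):
--         product = 1
--         for digit in str(i):
--             product *= int(digit)
--
--         unique_products.add(product)
--
--     return len(unique_products)
-- ===== SOURCE B (Python) =====
-- def find_unique_digit_products(number):
--     # Dynamic programming: dp[i] is the digit product of i (dp[0] = 1),
--     # computed from dp[i // 10] in O(1) instead of re-walking str(i).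
--     dp = [1]
--     products = set()
--     for i in range(1, number + 1):
--         v = dp[i // 10] * (i % 10)
--         dp.append(v)
--         products.add(v)
--     return len(products)
-- ===== Notes on version B (the rewrite author's own statement) =====
-- stated objective: faster
-- what changed: Replaces the per-number string conversion and inner digit loop with a dynamic-programming table dp[i] = dp[i // 10] * (i % 10), so each digit product is computed in O(1) from a smaller one.
import Mathlib
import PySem

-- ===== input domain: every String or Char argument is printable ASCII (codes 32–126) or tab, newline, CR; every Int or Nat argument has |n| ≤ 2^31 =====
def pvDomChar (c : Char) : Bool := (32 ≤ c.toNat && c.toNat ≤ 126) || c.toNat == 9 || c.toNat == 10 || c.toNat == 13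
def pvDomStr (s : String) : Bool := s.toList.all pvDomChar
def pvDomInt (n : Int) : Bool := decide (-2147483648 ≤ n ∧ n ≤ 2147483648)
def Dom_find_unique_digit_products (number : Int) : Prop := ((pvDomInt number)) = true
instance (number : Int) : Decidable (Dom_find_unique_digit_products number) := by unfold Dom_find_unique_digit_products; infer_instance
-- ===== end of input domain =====

-- B replaces A's per-number string walk by a DP table dp[i] = dp[i//10] * (i%10) (objective: faster).


-- ===== PORT A =====
-- 'for digit in str(i)' iterates the characters of str(i); int(digit) is
-- PySem.Int.ofChars? [c] — it is never none here since every i ≥ 1 yields decimal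
-- digit characters only, so '.getD 0' is exact.
def find_unique_digit_products (number : Int) : Int :=
  let unique_products : PySem.Set Int :=
    (PySem.List.pyRange 1 (number + 1) 1).foldl
      (fun up i =>
        let product : Int :=
          (PySem.Int.toChars i).foldl (fun p c => p * ((PySem.Int.ofChars? [c]).getD 0)) 1
        PySem.Set.add up product)
      PySem.Set.empty
  PySem.Set.len unique_products

-- ===== PORT B =====
def find_unique_digit_products_alt (number : Int) : Int :=
  let st :=
    (PySem.List.pyRange 1 (number + 1) 1).foldl
      (fun (st : List Int × PySem.Set Int) i =>
        let v : Int :=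
          PySem.List.pyGetD st.1 (PySem.Int.floordiv i 10) 0 * PySem.Int.mod i 10
        (st.1 ++ [v], PySem.Set.add st.2 v))
      ([1], PySem.Set.empty)
  PySem.Set.len st.2

-- ===== PRECONDITION & SPEC =====
def Spec_find_unique_digit_products (number : Int) (out : Int) : Prop := out = find_unique_digit_products_alt number
instance (number : Int) (out : Int) : Decidable (Spec_find_unique_digit_products number out) := by unfold Spec_find_unique_digit_products; infer_instance

-- ===== CLAIM (what is proved, stated in full; the proofs are below) =====
def Claim_equal_find_unique_digit_products : Prop := ∀ (number : Int), Dom_find_unique_digit_products number → Spec_find_unique_digit_products number (find_unique_digit_products number)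

-- ===== LEMMAS AND PROOFS =====


def pvDprod (n : Nat) : Int :=
  if n = 0 then 1 else pvDprod (n / 10) * ((n % 10 : Nat) : Int)
decreasing_by exact Nat.div_lt_self (Nat.pos_of_ne_zero (by assumption)) (by norm_num)

def pvAProd (i : Int) : Int :=
  (PySem.Int.toChars i).foldl (fun p c => p * ((PySem.Int.ofChars? [c]).getD 0)) 1

theorem pvOfChars_digitChar (d : Nat) (h : d < 10) :
    (PySem.Int.ofChars? [Nat.digitChar d]).getD 0 = (d : Int) := by
  interval_cases d <;> decide

theorem pvToDigitsCore_acc (b : Nat) :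
    ∀ fuel n ds, Nat.toDigitsCore b fuel n ds = Nat.toDigitsCore b fuel n [] ++ ds := by
  intro fuel
  induction fuel with
  | zero => intro n ds; simp [Nat.toDigitsCore]
  | succ f ih =>
    intro n ds
    simp only [Nat.toDigitsCore]
    by_cases h : n / b = 0
    · simp [h]
    · simp only [h]
      rw [ih (n / b) ((n % b).digitChar :: ds), ih (n / b) [(n % b).digitChar]]
      simp

theorem pvToDigitsCore_fuel (b : Nat) (hb : 2 ≤ b) :
    ∀ n fuel1 fuel2, n < fuel1 → n < fuel2 →
      Nat.toDigitsCore b fuel1 n [] = Nat.toDigitsCore b fuel2 n [] := by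
  intro n
  induction n using Nat.strong_induction_on with
  | _ n ih =>
    intro fuel1 fuel2 h1 h2
    obtain ⟨f1, rfl⟩ : ∃ f, fuel1 = f + 1 := ⟨fuel1 - 1, by omega⟩
    obtain ⟨f2, rfl⟩ : ∃ f, fuel2 = f + 1 := ⟨fuel2 - 1, by omega⟩
    simp only [Nat.toDigitsCore]
    by_cases h : n / b = 0
    · simp [h]
    · simp only [if_neg h]
      rw [pvToDigitsCore_acc b f1, pvToDigitsCore_acc b f2]
      have hn : 0 < n := by
        rcases Nat.eq_zero_or_pos n with h0 | h0
        · exact absurd (by simp [h0]) h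
        · exact h0
      have hdlt : n / b < n := Nat.div_lt_self hn (by omega)
      rw [ih (n / b) hdlt f1 f2 (by omega) (by omega)]

theorem pvToDigits_step (n : Nat) (h : 10 ≤ n) :
    Nat.toDigits 10 n = Nat.toDigits 10 (n / 10) ++ [Nat.digitChar (n % 10)] := by
  have h0 : n / 10 ≠ 0 := by omega
  show Nat.toDigitsCore 10 (n + 1) n [] =
    Nat.toDigitsCore 10 (n / 10 + 1) (n / 10) [] ++ [Nat.digitChar (n % 10)]
  conv_lhs => simp only [Nat.toDigitsCore]
  simp only [if_neg h0]
  rw [pvToDigitsCore_acc 10 n]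
  rw [pvToDigitsCore_fuel 10 (by norm_num) (n / 10) n (n / 10 + 1) (by omega) (by omega)]

theorem pvToDigits_small (n : Nat) (h : n < 10) :
    Nat.toDigits 10 n = [Nat.digitChar n] := by
  have h0 : n / 10 = 0 := by omega
  simp [Nat.toDigits, Nat.toDigitsCore, h0, Nat.mod_eq_of_lt h]

theorem pvToChars_natCast (n : Nat) : PySem.Int.toChars (n : Int) = Nat.toDigits 10 n := by
  simp [PySem.Int.toChars]

theorem pvAProd_eq : ∀ n : Nat, 1 ≤ n → pvAProd (n : Int) = pvDprod n := by
  intro n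
  induction n using Nat.strong_induction_on with
  | _ n ih =>
    intro h
    rw [pvAProd, pvToChars_natCast, pvDprod]
    rw [if_neg (by omega)]
    by_cases hlt : n < 10
    · rw [pvToDigits_small n hlt]
      simp only [List.foldl_cons, List.foldl_nil, one_mul]
      rw [pvOfChars_digitChar n hlt]
      have h10 : n / 10 = 0 := by omega
      rw [h10, Nat.mod_eq_of_lt hlt]
      simp [pvDprod]
    · push Not at hlt
      rw [pvToDigits_step n hlt, List.foldl_append]
      have hrec : (Nat.toDigits 10 (n / 10)).foldl
          (fun p c => p * ((PySem.Int.ofChars? [c]).getD 0)) 1 = pvDprod (n / 10) := by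
        rw [← pvToChars_natCast, ← pvAProd]
        exact ih (n / 10) (Nat.div_lt_self (by omega) (by norm_num)) (by omega)
      rw [List.foldl_cons, List.foldl_nil, hrec, pvOfChars_digitChar (n % 10) (by omega)]

theorem pvInvariant (N : Nat) :
    ((PySem.List.pyRange 1 ((N : Int) + 1) 1).foldl
      (fun (st : List Int × PySem.Set Int) i =>
        let v : Int :=
          PySem.List.pyGetD st.1 (PySem.Int.floordiv i 10) 0 * PySem.Int.mod i 10
        (st.1 ++ [v], PySem.Set.add st.2 v))
      ([1], PySem.Set.empty))
    = ((List.range (N + 1)).map pvDprod,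
       (PySem.List.pyRange 1 ((N : Int) + 1) 1).foldl
         (fun up i => PySem.Set.add up (pvAProd i)) PySem.Set.empty) := by
  induction N with
  | zero =>
    rw [PySem.List.pyRange_one_eq_nil (show ((0:Nat):Int) + 1 ≤ 1 by norm_num)]
    simp [pvDprod, PySem.Set.empty]
  | succ N ih =>
    have hcast : (((N + 1 : Nat) : Int)) + 1 = ((N : Int) + 1) + 1 := by push_cast; ring
    rw [hcast, PySem.List.pyRange_one_succ_right (show (1:Int) ≤ (N : Int) + 1 by omega),
        List.foldl_append, List.foldl_append, ih]
    simp only [List.foldl_cons, List.foldl_nil]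
    have hN1 : ((N : Int) + 1) = ((N + 1 : Nat) : Int) := by push_cast; ring
    have hv : PySem.List.pyGetD ((List.range (N + 1)).map pvDprod)
        (PySem.Int.floordiv ((N : Int) + 1) 10) 0 * PySem.Int.mod ((N : Int) + 1) 10
        = pvDprod (N + 1) := by
      rw [hN1, show (10:Int) = ((10:Nat):Int) by norm_num,
          PySem.Int.floordiv_natCast, PySem.Int.mod_natCast, PySem.List.pyGetD_natCast]
      rw [List.getD_eq_getElem?_getD]
      rw [List.getElem?_map, List.getElem?_range (by omega : (N + 1) / 10 < N + 1)]
      simp only [Option.map_some, Option.getD_some]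
      conv_rhs => rw [pvDprod]
      rw [if_neg (by omega : ¬ (N + 1) = 0)]
    have hA : pvAProd ((N : Int) + 1) = pvDprod (N + 1) := by
      rw [hN1]; exact pvAProd_eq (N + 1) (by omega)
    simp only [hv, hA]
    simp [List.range_succ]

-- ===== VERDICT (by name: the statement is the Claim_ definition above) =====
theorem find_unique_digit_products_spec : Claim_equal_find_unique_digit_products := by
  intro number _
  unfold Spec_find_unique_digit_products find_unique_digit_products find_unique_digit_products_alt
  by_cases hlt : number < 1
  · rw [PySem.List.pyRange_one_eq_nil (by omega : number + 1 ≤ 1)]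
    rfl
  · rw [show number = ((number.toNat : Nat) : Int) by omega]
    rw [pvInvariant number.toNat]
    rfl
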